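-- pv_equiv track=rewrite | github.com/hughmancoder/Automated_Hvf_Grading | electron-frontend/src/algorithm.py | checkRegion_iii
-- ===== SOURCE A (Python) =====
-- def checkRegion_iii(mat,region,ux,uy,lx,ly): #(iii) A cluster of at least 3 contiguous points in the same region depressed at P < 5% AND (GHT = Outside Normal Limits OR PSD = P < 0.5%)
--     for r in range(uy,ly):
--         for c in range(ux,lx-2):
--             if(0 < mat[r][c] <=5 and 0 < mat[r][c+1] <=5 and 0 < mat[r][c+2] <=5):
--                 return True;
--     #checking vertically contiguous regions
--     # |
--     # |
--     # |
--     for r in range(uy,ly-2):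
--         for c in range(ux,lx):
--             if((0 < mat[r][c] <=5) and (0 < mat[r+1][c] <=5) and (0 < mat[r+2][c] <=5)):
--                return True;
--
--     for r in range(uy,ly-1):
--         for c in range(ux,lx-1):
--             #checking pattern
--             #|
--             #|_
--             if(0 < mat[r][c] <=5 and 0 < mat[r+1][c] <=5 and 0 < mat[r+1][c+1] <=5):
--                 return True
--             #checking pattern
--             #|-
--             #|
--             if(0 < mat[r][c+1] <=5 and 0 < mat[r][c] <=5 and 0 < mat[r+1][c] <=5):
--                 return True
--
--     for r in range(uy,ly-1):
--         for c in range(ux,lx-1):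
--             #checking pattern
--             # -|
--             #  |
--             if(0 < mat[r][c] <=5 and 0 < mat[r][c+1] <=5 and 0 < mat[r+1][c+1] <=5):
--                 return True
--
--
--     for r in range(uy,ly-1):
--         for c in range(ux+1,lx):
--             #checking pattern
--             #  |
--             # _|
--             if(0 < mat[r][c] <=5 and 0 < mat[r+1][c] <=5 and 0 < mat[r+1][c-1] <=5):
--                 return True
--
--     return False
-- ===== SOURCE B (Python) =====
-- def checkRegion_iii(mat, region, ux, uy, lx, ly):
--     # A 4-connected cluster of >=3 depressed cells exists iff some depressed cell
--     # in the region has at least two depressed in-region 4-neighbours (the middle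
--     # of a 3-cell path); one scan replaces the six fixed triomino-pattern passes.
--     def dep(r, c):
--         return uy <= r < ly and ux <= c < lx and 0 < mat[r][c] <= 5
--     for r in range(uy, ly):
--         for c in range(ux, lx):
--             if dep(r, c) and dep(r - 1, c) + dep(r + 1, c) + dep(r, c - 1) + dep(r, c + 1) >= 2:
--                 return True
--     return False
-- ===== Notes on version B (the rewrite author's own statement) =====
-- stated objective: simpler
-- what changed: Replaces A's six separate double-loop passes over fixed triomino patterns by a single scan of the region that reports a depressed cell with at least two depressed in-region 4-neighbours (the middle of any 3-cell 4-connected cluster).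
-- outside the precondition, e.g. on checkRegion_iii([], 0, 0, 0, 1, 1): A returns False, B raises IndexError; on checkRegion_iii([[1, 1, 1]], 0, 0, 0, 5, 1): A returns True, B returns True
import Mathlib
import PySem

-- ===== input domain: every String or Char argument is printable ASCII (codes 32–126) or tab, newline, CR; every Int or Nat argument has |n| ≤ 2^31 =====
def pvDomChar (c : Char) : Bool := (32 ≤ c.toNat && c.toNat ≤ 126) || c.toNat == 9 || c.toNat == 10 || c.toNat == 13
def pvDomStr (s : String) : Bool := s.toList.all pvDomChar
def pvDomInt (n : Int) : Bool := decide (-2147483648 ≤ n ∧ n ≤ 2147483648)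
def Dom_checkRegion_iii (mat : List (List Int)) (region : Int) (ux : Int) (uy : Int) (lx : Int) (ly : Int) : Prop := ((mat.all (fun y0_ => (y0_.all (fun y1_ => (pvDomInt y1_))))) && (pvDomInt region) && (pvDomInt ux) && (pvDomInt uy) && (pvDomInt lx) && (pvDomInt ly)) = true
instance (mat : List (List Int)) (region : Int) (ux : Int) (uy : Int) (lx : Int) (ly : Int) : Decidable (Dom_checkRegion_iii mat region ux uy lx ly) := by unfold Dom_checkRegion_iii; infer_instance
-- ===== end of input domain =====

-- B replaces A's six fixed triomino-pattern passes by one scan that looks for a depressed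
-- cell with at least two depressed in-region 4-neighbours (objective: simpler).

-- shared cell read: mat[r][c] with Python index semantics (none = IndexError)
def pvCell (mat : List (List Int)) (r c : Int) : Option Int :=
  (PySem.List.pyGet? mat r).bind (fun row => PySem.List.pyGet? row c)

-- '0 < mat[r][c] <= 5' (false stands for the unreachable-under-Pre_ IndexError)
def pvDep (mat : List (List Int)) (r c : Int) : Bool :=
  match pvCell mat r c with
  | some v => decide (0 < v ∧ v ≤ 5)
  | none => false

-- ===== PORT A =====
def checkRegion_iii (mat : List (List Int)) (region : Int) (ux : Int) (uy : Int) (lx : Int) (ly : Int) : Bool :=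
  ((PySem.List.pyRange uy ly 1).any (fun r => (PySem.List.pyRange ux (lx - 2) 1).any (fun c =>
      pvDep mat r c && pvDep mat r (c + 1) && pvDep mat r (c + 2)))) ||
  ((PySem.List.pyRange uy (ly - 2) 1).any (fun r => (PySem.List.pyRange ux lx 1).any (fun c =>
      pvDep mat r c && pvDep mat (r + 1) c && pvDep mat (r + 2) c))) ||
  ((PySem.List.pyRange uy (ly - 1) 1).any (fun r => (PySem.List.pyRange ux (lx - 1) 1).any (fun c =>
      (pvDep mat r c && pvDep mat (r + 1) c && pvDep mat (r + 1) (c + 1)) ||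
      (pvDep mat r (c + 1) && pvDep mat r c && pvDep mat (r + 1) c)))) ||
  ((PySem.List.pyRange uy (ly - 1) 1).any (fun r => (PySem.List.pyRange ux (lx - 1) 1).any (fun c =>
      pvDep mat r c && pvDep mat r (c + 1) && pvDep mat (r + 1) (c + 1)))) ||
  ((PySem.List.pyRange uy (ly - 1) 1).any (fun r => (PySem.List.pyRange (ux + 1) lx 1).any (fun c =>
      pvDep mat r c && pvDep mat (r + 1) c && pvDep mat (r + 1) (c - 1))))

-- ===== PORT B =====
-- B's dep(r, c): in-region test short-circuits before the cell read
def pvDepIn (mat : List (List Int)) (ux uy lx ly r c : Int) : Bool :=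
  decide (uy ≤ r) && decide (r < ly) && decide (ux ≤ c) && decide (c < lx) && pvDep mat r c

def checkRegion_iii_alt (mat : List (List Int)) (region : Int) (ux : Int) (uy : Int) (lx : Int) (ly : Int) : Bool :=
  (PySem.List.pyRange uy ly 1).any (fun r => (PySem.List.pyRange ux lx 1).any (fun c =>
    pvDepIn mat ux uy lx ly r c &&
      decide (2 ≤ ((if pvDepIn mat ux uy lx ly (r - 1) c then (1 : Int) else 0) +
                   (if pvDepIn mat ux uy lx ly (r + 1) c then (1 : Int) else 0) +
                   (if pvDepIn mat ux uy lx ly r (c - 1) then (1 : Int) else 0) +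
                   (if pvDepIn mat ux uy lx ly r (c + 1) then (1 : Int) else 0)))))

-- ===== PRECONDITION & SPEC =====
-- Pre_ requires every cell of the region [uy,ly) x [ux,lx) to be indexable (Python
-- semantics, so negative in-range indices are allowed); it excludes inputs where a
-- region read raises IndexError, including some where A still returns because its
-- early exit or its degenerate pattern ranges skip the out-of-range cell.
-- (bounds checked before the row scan, so deciding it is fast even for huge bounds)
def pvPreB (mat : List (List Int)) (ux uy lx ly : Int) : Bool :=
  (decide (ly ≤ uy) || decide (lx ≤ ux)) ||
  (decide (-(mat.length : Int) ≤ uy) && decide (ly ≤ (mat.length : Int)) &&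
    (PySem.List.pyRange uy ly 1).all (fun r =>
      match PySem.List.pyGet? mat r with
      | some row => decide (-(row.length : Int) ≤ ux) && decide (lx ≤ (row.length : Int))
      | none => false))

def Pre_checkRegion_iii (mat : List (List Int)) (region : Int) (ux : Int) (uy : Int) (lx : Int) (ly : Int) : Prop :=
  pvPreB mat ux uy lx ly = true

instance (mat : List (List Int)) (region : Int) (ux : Int) (uy : Int) (lx : Int) (ly : Int) : Decidable (Pre_checkRegion_iii mat region ux uy lx ly) := by
  unfold Pre_checkRegion_iii; infer_instance

def pvWitness_checkRegion_iii : List (List Int) × Int × Int × Int × Int × Int :=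
  ([[1, 1, 1], [0, 2, 0]], 0, 0, 0, 3, 2)

def Spec_checkRegion_iii (mat : List (List Int)) (region : Int) (ux : Int) (uy : Int) (lx : Int) (ly : Int) (out : Bool) : Prop := out = checkRegion_iii_alt mat region ux uy lx ly
instance (mat : List (List Int)) (region : Int) (ux : Int) (uy : Int) (lx : Int) (ly : Int) (out : Bool) : Decidable (Spec_checkRegion_iii mat region ux uy lx ly out) := by unfold Spec_checkRegion_iii; infer_instance

-- ===== CLAIM (what is proved, stated in full; the proofs are below) =====
def Claim_equal_checkRegion_iii : Prop := ∀ (mat : List (List Int)) (region : Int) (ux : Int) (uy : Int) (lx : Int) (ly : Int), Dom_checkRegion_iii mat region ux uy lx ly → Pre_checkRegion_iii mat region ux uy lx ly → Spec_checkRegion_iii mat region ux uy lx ly (checkRegion_iii mat region ux uy lx ly)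

-- ===== LEMMAS AND PROOFS =====

theorem pvDepIn_iff (mat : List (List Int)) (ux uy lx ly r c : Int) :
    pvDepIn mat ux uy lx ly r c = true ↔
      uy ≤ r ∧ r < ly ∧ ux ≤ c ∧ c < lx ∧ pvDep mat r c = true := by
  simp [pvDepIn, and_assoc]

theorem pvTwoOfFour {b1 b2 b3 b4 : Bool} :
    (2 ≤ ((if b1 then (1 : Int) else 0) + (if b2 then (1 : Int) else 0) +
          (if b3 then (1 : Int) else 0) + (if b4 then (1 : Int) else 0))) ↔
    ((b1 = true ∧ b2 = true) ∨ (b1 = true ∧ b3 = true) ∨ (b1 = true ∧ b4 = true) ∨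
     (b2 = true ∧ b3 = true) ∨ (b2 = true ∧ b4 = true) ∨ (b3 = true ∧ b4 = true)) := by
  cases b1 <;> cases b2 <;> cases b3 <;> cases b4 <;> decide

-- A, characterized through pvDepIn (the region bounds of A's loop ranges are exactly
-- the requirement that all three pattern cells lie in the region)
theorem pvA_iff (mat : List (List Int)) (region ux uy lx ly : Int) :
    checkRegion_iii mat region ux uy lx ly = true ↔
      ((∃ r c, pvDepIn mat ux uy lx ly r c = true ∧ pvDepIn mat ux uy lx ly r (c + 1) = true ∧ pvDepIn mat ux uy lx ly r (c + 2) = true) ∨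
       (∃ r c, pvDepIn mat ux uy lx ly r c = true ∧ pvDepIn mat ux uy lx ly (r + 1) c = true ∧ pvDepIn mat ux uy lx ly (r + 2) c = true) ∨
       (∃ r c, (pvDepIn mat ux uy lx ly r c = true ∧ pvDepIn mat ux uy lx ly (r + 1) c = true ∧ pvDepIn mat ux uy lx ly (r + 1) (c + 1) = true) ∨
               (pvDepIn mat ux uy lx ly r (c + 1) = true ∧ pvDepIn mat ux uy lx ly r c = true ∧ pvDepIn mat ux uy lx ly (r + 1) c = true)) ∨
       (∃ r c, pvDepIn mat ux uy lx ly r c = true ∧ pvDepIn mat ux uy lx ly r (c + 1) = true ∧ pvDepIn mat ux uy lx ly (r + 1) (c + 1) = true) ∨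
       (∃ r c, pvDepIn mat ux uy lx ly r c = true ∧ pvDepIn mat ux uy lx ly (r + 1) c = true ∧ pvDepIn mat ux uy lx ly (r + 1) (c - 1) = true)) := by
  simp only [checkRegion_iii, List.any_eq_true, PySem.List.mem_pyRange_one,
    Bool.or_eq_true, Bool.and_eq_true, pvDepIn_iff]
  constructor
  · rintro ((((⟨r, ⟨h1, h2⟩, c, ⟨h3, h4⟩, ⟨p1, p2⟩, p3⟩ |
              ⟨r, ⟨h1, h2⟩, c, ⟨h3, h4⟩, ⟨p1, p2⟩, p3⟩) |
              ⟨r, ⟨h1, h2⟩, c, ⟨h3, h4⟩, (⟨⟨p1, p2⟩, p3⟩ | ⟨⟨p1, p2⟩, p3⟩)⟩) |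
              ⟨r, ⟨h1, h2⟩, c, ⟨h3, h4⟩, ⟨p1, p2⟩, p3⟩) |
              ⟨r, ⟨h1, h2⟩, c, ⟨h3, h4⟩, ⟨p1, p2⟩, p3⟩)
    · exact Or.inl ⟨r, c, ⟨by omega, by omega, by omega, by omega, p1⟩,
        ⟨by omega, by omega, by omega, by omega, p2⟩, ⟨by omega, by omega, by omega, by omega, p3⟩⟩
    · exact Or.inr (Or.inl ⟨r, c, ⟨by omega, by omega, by omega, by omega, p1⟩,
        ⟨by omega, by omega, by omega, by omega, p2⟩, ⟨by omega, by omega, by omega, by omega, p3⟩⟩)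
    · exact Or.inr (Or.inr (Or.inl ⟨r, c, Or.inl ⟨⟨by omega, by omega, by omega, by omega, p1⟩,
        ⟨by omega, by omega, by omega, by omega, p2⟩, ⟨by omega, by omega, by omega, by omega, p3⟩⟩⟩))
    · exact Or.inr (Or.inr (Or.inl ⟨r, c, Or.inr ⟨⟨by omega, by omega, by omega, by omega, p1⟩,
        ⟨by omega, by omega, by omega, by omega, p2⟩, ⟨by omega, by omega, by omega, by omega, p3⟩⟩⟩))
    · exact Or.inr (Or.inr (Or.inr (Or.inl ⟨r, c, ⟨by omega, by omega, by omega, by omega, p1⟩,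
        ⟨by omega, by omega, by omega, by omega, p2⟩, ⟨by omega, by omega, by omega, by omega, p3⟩⟩)))
    · exact Or.inr (Or.inr (Or.inr (Or.inr ⟨r, c, ⟨by omega, by omega, by omega, by omega, p1⟩,
        ⟨by omega, by omega, by omega, by omega, p2⟩, ⟨by omega, by omega, by omega, by omega, p3⟩⟩)))
  · rintro (⟨r, c, ⟨a1, a2, a3, a4, p1⟩, ⟨b1, b2, b3, b4, p2⟩, ⟨c1, c2, c3, c4, p3⟩⟩ |
            ⟨r, c, ⟨a1, a2, a3, a4, p1⟩, ⟨b1, b2, b3, b4, p2⟩, ⟨c1, c2, c3, c4, p3⟩⟩ |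
            ⟨r, c, (⟨⟨a1, a2, a3, a4, p1⟩, ⟨b1, b2, b3, b4, p2⟩, ⟨c1, c2, c3, c4, p3⟩⟩ |
                    ⟨⟨a1, a2, a3, a4, p1⟩, ⟨b1, b2, b3, b4, p2⟩, ⟨c1, c2, c3, c4, p3⟩⟩)⟩ |
            ⟨r, c, ⟨a1, a2, a3, a4, p1⟩, ⟨b1, b2, b3, b4, p2⟩, ⟨c1, c2, c3, c4, p3⟩⟩ |
            ⟨r, c, ⟨a1, a2, a3, a4, p1⟩, ⟨b1, b2, b3, b4, p2⟩, ⟨c1, c2, c3, c4, p3⟩⟩)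
    · exact Or.inl (Or.inl (Or.inl (Or.inl ⟨r, ⟨by omega, by omega⟩, c, ⟨by omega, by omega⟩, ⟨p1, p2⟩, p3⟩)))
    · exact Or.inl (Or.inl (Or.inl (Or.inr ⟨r, ⟨by omega, by omega⟩, c, ⟨by omega, by omega⟩, ⟨p1, p2⟩, p3⟩)))
    · exact Or.inl (Or.inl (Or.inr ⟨r, ⟨by omega, by omega⟩, c, ⟨by omega, by omega⟩, Or.inl ⟨⟨p1, p2⟩, p3⟩⟩))
    · exact Or.inl (Or.inl (Or.inr ⟨r, ⟨by omega, by omega⟩, c, ⟨by omega, by omega⟩, Or.inr ⟨⟨p1, p2⟩, p3⟩⟩))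
    · exact Or.inl (Or.inr ⟨r, ⟨by omega, by omega⟩, c, ⟨by omega, by omega⟩, ⟨p1, p2⟩, p3⟩)
    · exact Or.inr ⟨r, ⟨by omega, by omega⟩, c, ⟨by omega, by omega⟩, ⟨p1, p2⟩, p3⟩

-- B, characterized through pvDepIn (the loop bounds are implied by the centre's pvDepIn)
theorem pvB_iff (mat : List (List Int)) (region ux uy lx ly : Int) :
    checkRegion_iii_alt mat region ux uy lx ly = true ↔
      ∃ r c, pvDepIn mat ux uy lx ly r c = true ∧
        ((pvDepIn mat ux uy lx ly (r - 1) c = true ∧ pvDepIn mat ux uy lx ly (r + 1) c = true) ∨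
         (pvDepIn mat ux uy lx ly (r - 1) c = true ∧ pvDepIn mat ux uy lx ly r (c - 1) = true) ∨
         (pvDepIn mat ux uy lx ly (r - 1) c = true ∧ pvDepIn mat ux uy lx ly r (c + 1) = true) ∨
         (pvDepIn mat ux uy lx ly (r + 1) c = true ∧ pvDepIn mat ux uy lx ly r (c - 1) = true) ∨
         (pvDepIn mat ux uy lx ly (r + 1) c = true ∧ pvDepIn mat ux uy lx ly r (c + 1) = true) ∨
         (pvDepIn mat ux uy lx ly r (c - 1) = true ∧ pvDepIn mat ux uy lx ly r (c + 1) = true)) := by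
  simp only [checkRegion_iii_alt, List.any_eq_true, PySem.List.mem_pyRange_one,
    Bool.and_eq_true, decide_eq_true_eq, pvTwoOfFour]
  constructor
  · rintro ⟨r, _, c, _, hq, hp⟩
    exact ⟨r, c, hq, hp⟩
  · rintro ⟨r, c, hq, hp⟩
    obtain ⟨h1, h2, h3, h4, -⟩ := pvDepIn_iff mat ux uy lx ly r c |>.mp hq
    exact ⟨r, ⟨h1, h2⟩, c, ⟨h3, h4⟩, hq, hp⟩

theorem ports_agree (mat : List (List Int)) (region ux uy lx ly : Int) :
    checkRegion_iii mat region ux uy lx ly = checkRegion_iii_alt mat region ux uy lx ly := by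
  rw [Bool.eq_iff_iff, pvA_iff mat region, pvB_iff mat region]
  constructor
  · rintro (⟨r, c, p1, p2, p3⟩ | ⟨r, c, p1, p2, p3⟩ |
            ⟨r, c, (⟨p1, p2, p3⟩ | ⟨p1, p2, p3⟩)⟩ | ⟨r, c, p1, p2, p3⟩ | ⟨r, c, p1, p2, p3⟩)
    · -- horizontal: centre (r, c+1), pair left+right
      refine ⟨r, c + 1, p2, Or.inr (Or.inr (Or.inr (Or.inr (Or.inr ⟨?_, ?_⟩))))⟩
      · rw [show c + 1 - 1 = c from by omega]; exact p1
      · rw [show c + 1 + 1 = c + 2 from by omega]; exact p3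
    · -- vertical: centre (r+1, c), pair up+down
      refine ⟨r + 1, c, p2, Or.inl ⟨?_, ?_⟩⟩
      · rw [show r + 1 - 1 = r from by omega]; exact p1
      · rw [show r + 1 + 1 = r + 2 from by omega]; exact p3
    · -- L1 (r,c),(r+1,c),(r+1,c+1): centre (r+1, c), pair up+right
      refine ⟨r + 1, c, p2, Or.inr (Or.inr (Or.inl ⟨?_, p3⟩))⟩
      rw [show r + 1 - 1 = r from by omega]; exact p1
    · -- L2 (r,c+1),(r,c),(r+1,c): centre (r, c), pair down+right
      exact ⟨r, c, p2, Or.inr (Or.inr (Or.inr (Or.inr (Or.inl ⟨p3, p1⟩))))⟩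
    · -- L3 (r,c),(r,c+1),(r+1,c+1): centre (r, c+1), pair down+left
      refine ⟨r, c + 1, p2, Or.inr (Or.inr (Or.inr (Or.inl ⟨p3, ?_⟩)))⟩
      rw [show c + 1 - 1 = c from by omega]; exact p1
    · -- L4 (r,c),(r+1,c),(r+1,c-1): centre (r+1, c), pair up+left
      refine ⟨r + 1, c, p2, Or.inr (Or.inl ⟨?_, p3⟩)⟩
      rw [show r + 1 - 1 = r from by omega]; exact p1
  · rintro ⟨r, c, hc, (⟨n1, n2⟩ | ⟨n1, n2⟩ | ⟨n1, n2⟩ | ⟨n1, n2⟩ | ⟨n1, n2⟩ | ⟨n1, n2⟩)⟩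
    · -- up+down → vertical, anchor (r-1, c)
      refine Or.inr (Or.inl ⟨r - 1, c, n1, ?_, ?_⟩)
      · rw [show r - 1 + 1 = r from by omega]; exact hc
      · rw [show r - 1 + 2 = r + 1 from by omega]; exact n2
    · -- up+left → L4, anchor (r-1, c)
      refine Or.inr (Or.inr (Or.inr (Or.inr ⟨r - 1, c, n1, ?_, ?_⟩)))
      · rw [show r - 1 + 1 = r from by omega]; exact hc
      · rw [show r - 1 + 1 = r from by omega]; exact n2
    · -- up+right → L1, anchor (r-1, c)
      refine Or.inr (Or.inr (Or.inl ⟨r - 1, c, Or.inl ⟨n1, ?_, ?_⟩⟩))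
      · rw [show r - 1 + 1 = r from by omega]; exact hc
      · rw [show r - 1 + 1 = r from by omega]; exact n2
    · -- down+left → L3, anchor (r, c-1)
      refine Or.inr (Or.inr (Or.inr (Or.inl ⟨r, c - 1, n2, ?_, ?_⟩)))
      · rw [show c - 1 + 1 = c from by omega]; exact hc
      · rw [show c - 1 + 1 = c from by omega]; exact n1
    · -- down+right → L2, anchor (r, c)
      exact Or.inr (Or.inr (Or.inl ⟨r, c, Or.inr ⟨n2, hc, n1⟩⟩))
    · -- left+right → horizontal, anchor (r, c-1)
      refine Or.inl ⟨r, c - 1, n1, ?_, ?_⟩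
      · rw [show c - 1 + 1 = c from by omega]; exact hc
      · rw [show c - 1 + 2 = c + 1 from by omega]; exact n2

-- ===== VERDICT (by name: the statement is the Claim_ definition above) =====
theorem checkRegion_iii_spec : Claim_equal_checkRegion_iii := by
  intro mat region ux uy lx ly _ _
  exact ports_agree mat region ux uy lx ly
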